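-- pv_equiv track=rewrite | github.com/JimiMN/Projects | Python/Yatzy/Category_scores.py | one_pair
-- ===== SOURCE A (Python) =====
-- from operator import countOf
--
-- def check_for_pair(dices):
--
--     for i in range(1,7):
--
--         if countOf(dices.values(), i) > 1:
--
--             return True
--
--     return False
--
-- def one_pair(dices):
--
--     biggest_pair = 0
--
--     # No pairs
--     if check_for_pair == False:
--
--         return 0
--
--     else:
--
--         for i in range(1,7):
--
--             if countOf(dices.values(), i) > 1 and i * 2 > biggest_pair:
--
--                 biggest_pair = i * 2
--
--
--         return biggest_pair
-- ===== SOURCE B (Python) =====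
-- def one_pair(dices):
--     counts = {}
--     for v in dices.values():
--         counts[v] = counts.get(v, 0) + 1
--     pairs = [v for v, c in counts.items() if c >= 2 and 1 <= v <= 6]
--     return 2 * max(pairs) if pairs else 0
-- ===== Notes on version B (the rewrite author's own statement) =====
-- stated objective: idiomatic
-- what changed: B tallies the dice values into a frequency dict in one pass and returns 2*max of the distinct values in 1..6 seen at least twice (0 if none), instead of A's six separate countOf scans over the fixed range 1..6 with a running maximum.
import Mathlib
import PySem

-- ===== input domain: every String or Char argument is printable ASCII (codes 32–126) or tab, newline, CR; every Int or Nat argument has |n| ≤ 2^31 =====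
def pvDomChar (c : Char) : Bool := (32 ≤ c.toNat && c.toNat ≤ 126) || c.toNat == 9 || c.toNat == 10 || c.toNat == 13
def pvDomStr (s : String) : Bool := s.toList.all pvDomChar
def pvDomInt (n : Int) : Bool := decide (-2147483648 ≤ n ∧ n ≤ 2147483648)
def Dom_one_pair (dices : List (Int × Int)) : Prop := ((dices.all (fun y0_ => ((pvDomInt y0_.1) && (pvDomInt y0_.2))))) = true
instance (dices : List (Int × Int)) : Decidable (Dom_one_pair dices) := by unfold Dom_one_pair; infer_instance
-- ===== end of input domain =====

-- B builds one frequency table of the dice values and takes 2*max of the distinct values 1..6 seen at least twice,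
-- replacing A's per-face countOf scans over the fixed range 1..6 (objective: idiomatic; same asymptotic cost here).

-- ===== PORT A =====
-- A's `if check_for_pair == False:` compares the function object itself to False, which is never
-- True, so the else-branch always runs; ported as the always-taken else-branch (same value on every input).
def one_pair (dices : List (Int × Int)) : Int :=
  (PySem.List.pyRange 1 7 1).foldl
    (fun biggest_pair i =>
      if (dices.map Prod.snd).count i > 1 ∧ i * 2 > biggest_pair then i * 2 else biggest_pair)
    0

-- ===== PORT B =====
def one_pair_alt (dices : List (Int × Int)) : Int :=
  let counts := (dices.map Prod.snd).foldl
    (fun d v => d.insert v (d.getD v 0 + 1)) (PySem.Dict.empty : PySem.Dict Int Int)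
  let pairs := (counts.items.filter (fun p => 2 ≤ p.2 && 1 ≤ p.1 && p.1 ≤ 6)).map Prod.fst
  match PySem.List.max? pairs (fun x => x) with
  | some m => 2 * m
  | none => 0

-- ===== PRECONDITION & SPEC =====
def Spec_one_pair (dices : List (Int × Int)) (out : Int) : Prop := out = one_pair_alt dices
instance (dices : List (Int × Int)) (out : Int) : Decidable (Spec_one_pair dices out) := by unfold Spec_one_pair; infer_instance

-- ===== CLAIM (what is proved, stated in full; the proofs are below) =====
def Claim_equal_one_pair : Prop := ∀ (dices : List (Int × Int)), Dom_one_pair dices → Spec_one_pair dices (one_pair dices)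

-- ===== LEMMAS AND PROOFS =====

-- B's candidate list, characterised: membership means "value in 1..6 occurring at least twice".
lemma mem_pairs_iff (vals : List Int) (m : Int) :
    m ∈ ((((vals.foldl (fun d v => d.insert v (d.getD v 0 + 1))
        (PySem.Dict.empty : PySem.Dict Int Int)).items.filter
        (fun p => 2 ≤ p.2 && 1 ≤ p.1 && p.1 ≤ 6)).map Prod.fst)) ↔
      (2 ≤ vals.count m ∧ 1 ≤ m ∧ m ≤ 6) := by
  rw [PySem.Dict.foldl_insert_getD_add_one_eq_counter, PySem.Dict.items_counter]
  simp only [List.mem_map, List.mem_filter]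
  constructor
  · rintro ⟨⟨k, c⟩, ⟨⟨v, hv, hvk⟩, hc⟩, rfl⟩
    cases hvk
    simp only [Bool.and_eq_true, decide_eq_true_eq] at hc
    exact ⟨by exact_mod_cast hc.1.1, hc.1.2, hc.2⟩
  · rintro ⟨hcnt, h1, h6⟩
    refine ⟨(m, (vals.count m : Int)),
      ⟨⟨m, (PySem.Set.mem_ofList _ _).2 (List.count_pos_iff.1 (by omega)), rfl⟩, ?_⟩, rfl⟩
    simp only [Bool.and_eq_true, decide_eq_true_eq]
    exact ⟨⟨by exact_mod_cast hcnt, h1⟩, h6⟩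

-- A's loop body never changes the accumulator across faces that occur at most once.
lemma foldStep_const (vals : List Int) (l : List Int) (acc : Int)
    (h : ∀ i ∈ l, vals.count i ≤ 1) :
    l.foldl (fun biggest_pair i =>
      if vals.count i > 1 ∧ i * 2 > biggest_pair then i * 2 else biggest_pair) acc = acc := by
  induction l generalizing acc with
  | nil => rfl
  | cons x t ih =>
    rw [List.foldl_cons, if_neg]
    · exact ih acc (fun i hi => h i (List.mem_cons_of_mem _ hi))
    · have := h x (List.mem_cons_self ..)
      rintro ⟨h1, _⟩
      omega

-- A's accumulator stays below any bound dominating 2*i for the faces scanned so far.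
lemma foldStep_le (vals : List Int) (l : List Int) (b acc : Int)
    (hl : ∀ i ∈ l, i * 2 ≤ b) (ha : acc ≤ b) :
    l.foldl (fun biggest_pair i =>
      if vals.count i > 1 ∧ i * 2 > biggest_pair then i * 2 else biggest_pair) acc ≤ b := by
  induction l generalizing acc with
  | nil => simpa using ha
  | cons x t ih =>
    rw [List.foldl_cons]
    refine ih _ (fun i hi => hl i (List.mem_cons_of_mem _ hi)) ?_
    split_ifs
    · exact hl x (List.mem_cons_self ..)
    · exact ha

-- Maximality of m over B's candidates gives count ≤ 1 for every larger face.
lemma counts_le (vals : List Int) (m : Int)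
    (hmax : ∀ i : Int, 1 ≤ i → i ≤ 6 → 1 < vals.count i → i ≤ m) :
    ∀ i : Int, 1 ≤ i → m < i → i ≤ 6 → vals.count i ≤ 1 := by
  intro i h1 hmi h6
  by_contra h
  have := hmax i h1 h6 (by omega)
  omega

-- A's ascending fold over 1..6, when m is the largest face occurring at least twice.
lemma foldA_some (vals : List Int) (m : Int) (h1 : 1 ≤ m) (h6 : m ≤ 6)
    (hc : 1 < vals.count m)
    (hmax : ∀ i : Int, 1 ≤ i → i ≤ 6 → 1 < vals.count i → i ≤ m) :
    ([1, 2, 3, 4, 5, 6] : List Int).foldl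
      (fun biggest_pair i => if vals.count i > 1 ∧ i * 2 > biggest_pair then i * 2 else biggest_pair)
      0 = 2 * m := by
  have hle := counts_le vals m hmax
  interval_cases m
  · have hs : ([1, 2, 3, 4, 5, 6] : List Int) = [] ++ 1 :: [2, 3, 4, 5, 6] := rfl
    rw [hs, List.foldl_append, List.foldl_cons,
      foldStep_const vals _ _ (by intro i hi; fin_cases hi <;> exact hle _ (by norm_num) (by norm_num) (by norm_num))]
    rw [if_pos ⟨hc, by norm_num [List.foldl]⟩]
    ring
  · have hs : ([1, 2, 3, 4, 5, 6] : List Int) = [1] ++ 2 :: [3, 4, 5, 6] := rfl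
    have hb := foldStep_le vals [1] 2 0 (by intro i hi; fin_cases hi <;> norm_num) (by norm_num)
    rw [hs, List.foldl_append, List.foldl_cons,
      foldStep_const vals _ _ (by intro i hi; fin_cases hi <;> exact hle _ (by norm_num) (by norm_num) (by norm_num))]
    rw [if_pos ⟨hc, by omega⟩]
  · have hs : ([1, 2, 3, 4, 5, 6] : List Int) = [1, 2] ++ 3 :: [4, 5, 6] := rfl
    have hb := foldStep_le vals [1, 2] 4 0 (by intro i hi; fin_cases hi <;> norm_num) (by norm_num)
    rw [hs, List.foldl_append, List.foldl_cons,
      foldStep_const vals _ _ (by intro i hi; fin_cases hi <;> exact hle _ (by norm_num) (by norm_num) (by norm_num))]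
    rw [if_pos ⟨hc, by omega⟩]
    ring
  · have hs : ([1, 2, 3, 4, 5, 6] : List Int) = [1, 2, 3] ++ 4 :: [5, 6] := rfl
    have hb := foldStep_le vals [1, 2, 3] 6 0 (by intro i hi; fin_cases hi <;> norm_num) (by norm_num)
    rw [hs, List.foldl_append, List.foldl_cons,
      foldStep_const vals _ _ (by intro i hi; fin_cases hi <;> exact hle _ (by norm_num) (by norm_num) (by norm_num))]
    rw [if_pos ⟨hc, by omega⟩]
    ring
  · have hs : ([1, 2, 3, 4, 5, 6] : List Int) = [1, 2, 3, 4] ++ 5 :: [6] := rfl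
    have hb := foldStep_le vals [1, 2, 3, 4] 8 0 (by intro i hi; fin_cases hi <;> norm_num) (by norm_num)
    rw [hs, List.foldl_append, List.foldl_cons,
      foldStep_const vals _ _ (by intro i hi; fin_cases hi <;> exact hle _ (by norm_num) (by norm_num) (by norm_num))]
    rw [if_pos ⟨hc, by omega⟩]
    ring
  · have hs : ([1, 2, 3, 4, 5, 6] : List Int) = [1, 2, 3, 4, 5] ++ 6 :: [] := rfl
    have hb := foldStep_le vals [1, 2, 3, 4, 5] 10 0 (by intro i hi; fin_cases hi <;> norm_num) (by norm_num)
    rw [hs, List.foldl_append, List.foldl_cons, List.foldl_nil]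
    rw [if_pos ⟨hc, by omega⟩]
    ring

-- ===== VERDICT (by name: the statement is the Claim_ definition above) =====
theorem one_pair_spec : Claim_equal_one_pair := by
  intro dices _
  unfold Spec_one_pair one_pair one_pair_alt
  simp only []
  set vals := dices.map Prod.snd with hvals
  have hrange : PySem.List.pyRange 1 7 1 = [1, 2, 3, 4, 5, 6] := by decide
  rw [hrange]
  rcases hmx : PySem.List.max? ((((vals.foldl (fun d v => d.insert v (d.getD v 0 + 1))
      (PySem.Dict.empty : PySem.Dict Int Int)).items.filter
      (fun p => 2 ≤ p.2 && 1 ≤ p.1 && p.1 ≤ 6)).map Prod.fst)) (fun x => x) with _ | m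
  · rw [hmx]
    rw [PySem.List.max?_eq_none_iff] at hmx
    refine foldStep_const vals _ _ ?_
    intro i hi
    by_contra h
    have hmem : i ∈ (([] : List Int)) := by
      refine hmx ▸ (mem_pairs_iff vals i).2 ⟨by omega, ?_, ?_⟩ <;> fin_cases hi <;> norm_num
    simp at hmem
  · rw [hmx]
    obtain ⟨hcnt, h1, h6⟩ := (mem_pairs_iff vals m).1 (PySem.List.max?_mem hmx)
    exact foldA_some vals m h1 h6 (by omega)
      (fun i hi1 hi6 hic =>
        PySem.List.max?_isMax hmx i ((mem_pairs_iff vals i).2 ⟨by omega, hi1, hi6⟩))
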